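-- pv_equiv track=rewrite | github.com/edgarasliberis/bioinformatics-exercises | Supervision1/Folding.py | nussinov_brackets
-- ===== SOURCE A (Python) =====
-- class Ptr:
--     Match, LUnmatch, RUnmatch, Bifurcation = range(4)
--
-- def nussinov_brackets(a, fold):
--     D, P, B = fold
--     dbr = list('.'*len(a))
--
--     stack = [(0, len(a)-1)]
--     while stack:
--         i, j = stack.pop()
--         if i >= j:
--             continue
--         if P[i][j] == Ptr.Match:
--             stack.append((i+1, j-1))
--             dbr[i] = '('
--             dbr[j] = ')'
--         elif P[i][j] == Ptr.LUnmatch: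
--             stack.append((i+1, j))
--         elif P[i][j] == Ptr.RUnmatch:
--             stack.append((i, j-1))
--         elif P[i][j] == Ptr.Bifurcation:
--             k = B[i][j]
--             stack.append((k+1, j))
--             stack.append((i, k))
--     return ''.join(dbr)
-- ===== SOURCE B (Python) =====
-- # Recursive-descent traceback instead of an explicit work stack; same pointer codes.
-- def nussinov_brackets(a, fold):
--     D, P, B = fold
--     dbr = ['.'] * len(a)
--
--     def rec(i, j):
--         if i >= j:
--             return
--         p = P[i][j]
--         if p == 0:          # Match
--             dbr[i] = '('
--             dbr[j] = ')'
--             rec(i + 1, j - 1)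
--         elif p == 1:        # LUnmatch
--             rec(i + 1, j)
--         elif p == 2:        # RUnmatch
--             rec(i, j - 1)
--         elif p == 3:        # Bifurcation
--             k = B[i][j]
--             rec(i, k)
--             rec(k + 1, j)
--
--     rec(0, len(a) - 1)
--     return ''.join(dbr)
-- ===== Notes on version B (the rewrite author's own statement) =====
-- stated objective: simpler
-- what changed: The explicit LIFO work-stack loop is replaced by a direct recursive traversal rec(i, j) of the traceback tree, branching on the pointer code and recursing on the sub-intervals.
-- outside the precondition, e.g. on nussinov_brackets('ab', ([], [[0, 3], [9, 0]], [[0, -2], [0, 0]])): A returns '.)', B returns '.)'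
import Mathlib
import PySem

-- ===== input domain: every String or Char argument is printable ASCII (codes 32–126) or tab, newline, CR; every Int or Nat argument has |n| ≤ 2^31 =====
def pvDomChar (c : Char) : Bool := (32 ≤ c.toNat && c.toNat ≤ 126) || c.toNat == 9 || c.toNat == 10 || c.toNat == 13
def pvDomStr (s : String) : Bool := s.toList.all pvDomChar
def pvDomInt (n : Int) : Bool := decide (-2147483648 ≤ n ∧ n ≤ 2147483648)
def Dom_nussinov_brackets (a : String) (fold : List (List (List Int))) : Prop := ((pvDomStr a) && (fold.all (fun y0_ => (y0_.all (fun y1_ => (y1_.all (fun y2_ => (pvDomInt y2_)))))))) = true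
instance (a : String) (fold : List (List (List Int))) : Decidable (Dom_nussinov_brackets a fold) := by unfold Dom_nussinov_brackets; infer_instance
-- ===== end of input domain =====

-- B replaces A's explicit LIFO work-stack loop with a direct recursive traversal of the
-- traceback tree (same pointer codes, same writes); return values agree on Pre_.

-- ===== PORT A =====
-- M[i][j] (Python 2-level indexing; total via pyGetD, exact on in-range indices,
-- which Pre_ guarantees for every access the program performs)
def matA (M : List (List Int)) (i j : Int) : Int :=
  PySem.List.pyGetD (PySem.List.pyGetD M i []) j 0

-- dbr[i] = c (total via pySetD; in range under Pre_)
def wrA (dbr : List Char) (i : Int) (c : Char) : List Char :=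
  PySem.List.pySetD dbr i c

-- A's while-loop over the explicit stack (head = top of Python's stack; fuel is only a
-- totality guard — Pre_ guarantees it is never exhausted, see loopA_eq_foldl below)
def loopA (P B : List (List Int)) : Nat → List (Int × Int) → List Char → List Char
  | 0, _, dbr => dbr
  | _ + 1, [], dbr => dbr
  | f + 1, (i, j) :: s, dbr =>
    if i ≥ j then loopA P B f s dbr
    else if matA P i j = 0 then
      loopA P B f ((i + 1, j - 1) :: s) (wrA (wrA dbr i '(') j ')')
    else if matA P i j = 1 then loopA P B f ((i + 1, j) :: s) dbr
    else if matA P i j = 2 then loopA P B f ((i, j - 1) :: s) dbr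
    else if matA P i j = 3 then
      loopA P B f ((i, matA B i j) :: (matA B i j + 1, j) :: s) dbr
    else loopA P B f s dbr

def nussinov_brackets (a : String) (fold : List (List (List Int))) : String :=
  match fold with
  | [_D, P, B] =>
    let n := PySem.Str.len a
    String.ofList (loopA P B (2 * n.toNat + 2) [(0, n - 1)] (List.replicate n.toNat '.'))
  | _ => ""   -- Python raises ValueError on the 3-way unpack; outside Pre_

-- ===== PORT B =====
-- B's own copies of the two indexing primitives (Source B performs the same accesses)
def matB (M : List (List Int)) (i j : Int) : Int :=
  PySem.List.pyGetD (PySem.List.pyGetD M i []) j 0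

def wrB (dbr : List Char) (i : Int) (c : Char) : List Char :=
  PySem.List.pySetD dbr i c

-- Source B's rec(i, j), threading dbr (fuel = recursion-depth guard, never exhausted on Pre_)
def recB (P B : List (List Int)) : Nat → Int → Int → List Char → List Char
  | 0, _, _, dbr => dbr
  | f + 1, i, j, dbr =>
    if i ≥ j then dbr
    else
      let p := matB P i j
      if p = 0 then recB P B f (i + 1) (j - 1) (wrB (wrB dbr i '(') j ')')
      else if p = 1 then recB P B f (i + 1) j dbr
      else if p = 2 then recB P B f i (j - 1) dbr
      else if p = 3 then
        let k := matB B i j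
        recB P B f (k + 1) j (recB P B f i k dbr)
      else dbr

-- 'D, P, B = fold' ported as a length-3 guard with positional reads
def nussinov_brackets_alt (a : String) (fold : List (List (List Int))) : String :=
  if fold.length = 3 then
    let P := fold.getD 1 []
    let B := fold.getD 2 []
    let n := PySem.Str.len a
    String.ofList (recB P B (n.toNat + 1) 0 (n - 1) (List.replicate n.toNat '.'))
  else ""   -- Python raises ValueError on the 3-way unpack; outside Pre_

-- ===== PRECONDITION & SPEC =====
-- Pre_ excludes malformed pointer tables (fold not of length 3; a P/B row missing or too
-- short; a Bifurcation pointer B[i][j] outside [i, j)): there A raises (ValueError /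
-- IndexError / RecursionError), loops forever, or happens to return via Python's
-- negative-index wraparound, which is an accident of list indexing, not of the algorithm.
def Pre_nussinov_brackets (a : String) (fold : List (List (List Int))) : Prop :=
  fold.length = 3 ∧
  ∀ j : Nat, j < a.toList.length → ∀ i : Nat, i < j →
    i < (fold.getD 1 []).length ∧
    j < ((fold.getD 1 []).getD i []).length ∧
    (((fold.getD 1 []).getD i []).getD j 0 = 3 →
      i < (fold.getD 2 []).length ∧
      j < ((fold.getD 2 []).getD i []).length ∧
      (i : Int) ≤ ((fold.getD 2 []).getD i []).getD j 0 ∧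
      ((fold.getD 2 []).getD i []).getD j 0 < (j : Int))

instance (a : String) (fold : List (List (List Int))) : Decidable (Pre_nussinov_brackets a fold) := by
  unfold Pre_nussinov_brackets; infer_instance

def pvWitness_nussinov_brackets : String × List (List (List Int)) :=
  ("ab", [[], [[0, 0], [0, 0]], [[0, 0], [0, 0]]])

def Spec_nussinov_brackets (a : String) (fold : List (List (List Int))) (out : String) : Prop := out = nussinov_brackets_alt a fold
instance (a : String) (fold : List (List (List Int))) (out : String) : Decidable (Spec_nussinov_brackets a fold out) := by unfold Spec_nussinov_brackets; infer_instance

-- ===== CLAIM (what is proved, stated in full; the proofs are below) =====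
def Claim_equal_nussinov_brackets : Prop := ∀ (a : String) (fold : List (List (List Int))), Dom_nussinov_brackets a fold → Pre_nussinov_brackets a fold → Spec_nussinov_brackets a fold (nussinov_brackets a fold)

-- ===== LEMMAS AND PROOFS =====

-- the two ports' indexing/assignment primitives are the same function
theorem matB_eq : matB = matA := rfl
theorem wrB_eq : wrB = wrA := rfl

-- weight of one stack entry: every loop iteration of A strictly decreases the total weight
def entW (i j : Int) : Nat := 2 * (j - i).toNat + 1

-- total weight of A's stack
def stkW : List (Int × Int) → Nat
  | [] => 0
  | (i, j) :: s => entW i j + stkW s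

-- B's recursion is insensitive to the fuel once it exceeds the interval length,
-- provided every Bifurcation pointer in range points inside its interval
theorem recB_fuel_irrel (P Bm : List (List Int)) (N : Int)
    (Hok : ∀ i j : Int, 0 ≤ i → i < j → j < N → matB P i j = 3 →
      i ≤ matB Bm i j ∧ matB Bm i j < j) :
    ∀ (m g g' : Nat) (i j : Int) (dbr : List Char), (j - i).toNat ≤ m →
      0 ≤ i → j < N → (j - i).toNat < g → (j - i).toNat < g' →
      recB P Bm g i j dbr = recB P Bm g' i j dbr := by
  intro m
  induction m with
  | zero =>
    intro g g' i j dbr hm h0 hN hg hg'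
    obtain ⟨fg, rfl⟩ : ∃ fg, g = fg + 1 := ⟨g - 1, by omega⟩
    obtain ⟨fg', rfl⟩ : ∃ fg', g' = fg' + 1 := ⟨g' - 1, by omega⟩
    have hij : i ≥ j := by omega
    simp [recB, hij]
  | succ m ih =>
    intro g g' i j dbr hm h0 hN hg hg'
    obtain ⟨fg, rfl⟩ : ∃ fg, g = fg + 1 := ⟨g - 1, by omega⟩
    obtain ⟨fg', rfl⟩ : ∃ fg', g' = fg' + 1 := ⟨g' - 1, by omega⟩
    by_cases hij : i ≥ j
    · simp [recB, hij]
    · have hlt : i < j := by omega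
      have htn : (j - i).toNat = (j - i) := Int.toNat_of_nonneg (by omega)
      simp only [recB, if_neg hij]
      by_cases h0p : matB P i j = 0
      · simp only [h0p]
        exact ih fg fg' _ _ _ (by omega) (by omega) (by omega) (by omega) (by omega)
      · simp only [h0p, ite_false]
        by_cases h1p : matB P i j = 1
        · simp only [h1p]
          exact ih fg fg' _ _ _ (by omega) (by omega) (by omega) (by omega) (by omega)
        · simp only [h1p, ite_false]
          by_cases h2p : matB P i j = 2
          · simp only [h2p]
            exact ih fg fg' _ _ _ (by omega) (by omega) (by omega) (by omega) (by omega)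
          · simp only [h2p, ite_false]
            by_cases h3p : matB P i j = 3
            · simp only [h3p]
              obtain ⟨hk1, hk2⟩ := Hok i j h0 hlt hN h3p
              have hin : recB P Bm fg i (matB Bm i j) dbr
                  = recB P Bm fg' i (matB Bm i j) dbr :=
                ih fg fg' _ _ _ (by omega) (by omega) (by omega) (by omega) (by omega)
              rw [hin]
              exact ih fg fg' _ _ _ (by omega) (by omega) (by omega) (by omega) (by omega)
            · simp [h3p]

-- A's stack loop computes the left fold of B's recursion over the stack entries
theorem loopA_eq_foldl (P Bm : List (List Int)) (N : Int) (F : Nat)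
    (Hok : ∀ i j : Int, 0 ≤ i → i < j → j < N → matA P i j = 3 →
      i ≤ matA Bm i j ∧ matA Bm i j < j)
    (hF : ∀ i j : Int, 0 ≤ i → i < j → j < N → (j - i).toNat < F)
    (hF0 : 0 < F) :
    ∀ (f : Nat) (s : List (Int × Int)) (dbr : List Char),
      (∀ p ∈ s, 0 ≤ p.1 ∧ p.2 < N) → stkW s ≤ f →
      loopA P Bm f s dbr = s.foldl (fun d p => recB P Bm F p.1 p.2 d) dbr := by
  have congr' := recB_fuel_irrel P Bm N Hok
  intro f
  induction f with
  | zero =>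
    intro s dbr hs hw
    cases s with
    | nil => simp [loopA]
    | cons p t => exact absurd hw (by simp only [stkW, entW]; omega)
  | succ f ih =>
    intro s dbr hs hw
    obtain ⟨Fp, hFe⟩ : ∃ Fp, F = Fp + 1 := ⟨F - 1, by omega⟩
    cases s with
    | nil => simp [loopA]
    | cons p t =>
      obtain ⟨i, j⟩ := p
      obtain ⟨h0, hN⟩ := hs (i, j) (by simp)
      have ht : ∀ q ∈ t, 0 ≤ q.1 ∧ q.2 < N := fun q hq => hs q (by simp [hq])
      have hwt : entW i j + stkW t ≤ f + 1 := by simpa [stkW] using hw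
      by_cases hij : i ≥ j
      · have hstep : recB P Bm F i j dbr = dbr := by rw [hFe]; simp [recB, hij]
        simp only [loopA, if_pos hij, List.foldl_cons, hstep]
        exact ih t dbr ht (by simp [entW] at hwt; omega)
      · have hlt : i < j := by omega
        have htn : (j - i).toNat = (j - i) := Int.toNat_of_nonneg (by omega)
        have hFij : (j - i).toNat < F := hF i j h0 hlt hN
        simp only [loopA, if_neg hij, List.foldl_cons]
        by_cases h0p : matA P i j = 0
        · simp only [h0p]
          rw [ih ((i + 1, j - 1) :: t) _
                (by intro q hq; rcases List.mem_cons.mp hq with h | h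
                    · subst h; constructor <;> [omega; omega]
                    · exact ht q h)
                (by simp [stkW, entW] at hwt ⊢; omega)]
          have hstep : recB P Bm F i j dbr
              = recB P Bm Fp (i + 1) (j - 1) (wrA (wrA dbr i '(') j ')') := by
            rw [hFe]; simp [recB, matB_eq, wrB_eq, hij, h0p]
          rw [List.foldl_cons, hstep,
            congr' (j - i).toNat Fp F _ _ _ (by omega) (by omega) (by omega) (by omega)
              (by omega)]
          simp
        · simp only [h0p, ite_false]
          by_cases h1p : matA P i j = 1
          · simp only [h1p]
            rw [ih ((i + 1, j) :: t) _
                  (by intro q hq; rcases List.mem_cons.mp hq with h | h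
                      · subst h; constructor <;> [omega; omega]
                      · exact ht q h)
                  (by simp [stkW, entW] at hwt ⊢; omega)]
            have hstep : recB P Bm F i j dbr = recB P Bm Fp (i + 1) j dbr := by
              rw [hFe]; simp [recB, matB_eq, hij, h1p]
            rw [List.foldl_cons, hstep,
              congr' (j - i).toNat Fp F _ _ _ (by omega) (by omega) (by omega) (by omega)
                (by omega)]
            simp
          · simp only [h1p, ite_false]
            by_cases h2p : matA P i j = 2
            · simp only [h2p]
              rw [ih ((i, j - 1) :: t) _
                    (by intro q hq; rcases List.mem_cons.mp hq with h | h
                        · subst h; constructor <;> [omega; omega]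
                        · exact ht q h)
                    (by simp [stkW, entW] at hwt ⊢; omega)]
              have hstep : recB P Bm F i j dbr = recB P Bm Fp i (j - 1) dbr := by
                rw [hFe]; simp [recB, matB_eq, hij, h2p]
              rw [List.foldl_cons, hstep,
                congr' (j - i).toNat Fp F _ _ _ (by omega) (by omega) (by omega) (by omega)
                  (by omega)]
              simp
            · simp only [h2p, ite_false]
              by_cases h3p : matA P i j = 3
              · simp only [h3p]
                obtain ⟨hk1, hk2⟩ := Hok i j h0 hlt hN h3p
                rw [ih ((i, matA Bm i j) :: (matA Bm i j + 1, j) :: t) _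
                      (by intro q hq
                          rcases List.mem_cons.mp hq with h | h
                          · subst h; constructor <;> [omega; omega]
                          · rcases List.mem_cons.mp h with h' | h'
                            · subst h'; constructor <;> [omega; omega]
                            · exact ht q h')
                      (by simp [stkW, entW] at hwt ⊢; omega)]
                have hstep : recB P Bm F i j dbr
                    = recB P Bm Fp (matA Bm i j + 1) j (recB P Bm Fp i (matA Bm i j) dbr) := by
                  rw [hFe]; simp [recB, matB_eq, hij, h3p]
                rw [List.foldl_cons, List.foldl_cons, hstep,
                  congr' (j - i).toNat Fp F _ _ _ (by omega) (by omega) (by omega) (by omega)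
                    (by omega),
                  congr' (j - i).toNat Fp F _ _ _ (by omega) (by omega) (by omega) (by omega)
                    (by omega)]
                simp
              · simp only [h3p, ite_false]
                have hstep : recB P Bm F i j dbr = dbr := by
                  rw [hFe]; simp [recB, matB_eq, hij, h0p, h1p, h2p, h3p]
                rw [hstep]
                exact ih t dbr ht (by simp [entW] at hwt; omega)

-- mat agrees with plain getD indexing when both indices are nonnegative and in range
theorem matA_eq_getD (M : List (List Int)) (i j : Int) (h0i : 0 ≤ i) (h0j : 0 ≤ j)
    (hi : i.toNat < M.length) (hj : j.toNat < (M.getD i.toNat []).length) :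
    matA M i j = (M.getD i.toNat []).getD j.toNat 0 := by
  have h1 : PySem.List.pyGetD M i [] = M.getD i.toNat [] := by
    rw [PySem.List.pyGetD_eq_getElem M [] h0i (by omega),
      List.getD_eq_getElem _ _ hi]
  rw [matA, h1, PySem.List.pyGetD_eq_getElem _ 0 h0j (by omega),
    List.getD_eq_getElem _ _ hj]

-- ===== VERDICT (by name: the statement is the Claim_ definition above) =====
theorem nussinov_brackets_spec : Claim_equal_nussinov_brackets := by
  intro a fold _hDom hPre
  unfold Spec_nussinov_brackets
  obtain ⟨h3, hb⟩ := hPre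
  match fold, h3 with
  | [D, P, Bm], _ =>
    simp only [List.getD_cons_succ, List.getD_cons_zero] at hb
    have hNlen : PySem.Str.len a = (a.toList.length : Int) := PySem.Str.len_eq a
    set N : Int := PySem.Str.len a with hNdef
    have Hok : ∀ i j : Int, 0 ≤ i → i < j → j < N → matA P i j = 3 →
        i ≤ matA Bm i j ∧ matA Bm i j < j := by
      intro i j h0 hlt hN h3p
      obtain ⟨hP1, hP2, hB⟩ := hb j.toNat (by omega) i.toNat (by omega)
      rw [matA_eq_getD P i j h0 (by omega) hP1 hP2] at h3p
      obtain ⟨hB1, hB2, hk1, hk2⟩ := hB h3p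
      rw [matA_eq_getD Bm i j h0 (by omega) hB1 hB2]
      constructor <;> omega
    simp only [nussinov_brackets, nussinov_brackets_alt]
    rw [loopA_eq_foldl P Bm N (N.toNat + 1) Hok
          (by intro i j h0 hlt hN; omega) (by omega)
          (2 * N.toNat + 2) [(0, N - 1)]
          (List.replicate N.toNat '.')
          (by intro q hq; simp at hq; subst hq; constructor <;> [omega; omega])
          (by simp [stkW, entW]; omega)]
    have hl : a.toList.length = a.length := by simp
    simp [List.foldl_cons, hNlen, hl]
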